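-- pv_equiv track=rewrite | github.com/YMUNick/marksix | generate_data.py | compute_gap_analysis
-- ===== SOURCE A (Python) =====
-- def compute_gap_analysis(draws):
--     """Gap analysis: how many draws since each number last appeared."""
--     last_seen = {}
--     total = len(draws)
--     for i, d in enumerate(draws):
--         for n in d['numbers']:
--             last_seen[n] = i
--
--     return {
--         str(n): total - 1 - last_seen.get(n, 0)
--         for n in range(1, 50)
--     }
-- ===== SOURCE B (Python) =====
-- def compute_gap_analysis(draws):
--     """Gap analysis: how many draws since each number last appeared."""
--     total = len(draws)
--     result = {}
--     for n in range(1, 50):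
--         gap = total - 1  # default: never seen (and -1 when there are no draws)
--         for ri, d in enumerate(reversed(draws)):
--             if n in d['numbers']:
--                 gap = ri
--                 break
--         result[str(n)] = gap
--     return result
-- ===== Notes on version B (the rewrite author's own statement) =====
-- stated objective: alternative
-- what changed: B removes A's last_seen dictionary entirely: for each of the 49 numbers it performs an independent backward scan of the draws with an early break at the first (i.e. most recent) draw containing that number, so the gap is read off directly as the reverse index; A instead makes one forward pass building a hash index of last positions and then converts with total-1-i.
import Mathlib
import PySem

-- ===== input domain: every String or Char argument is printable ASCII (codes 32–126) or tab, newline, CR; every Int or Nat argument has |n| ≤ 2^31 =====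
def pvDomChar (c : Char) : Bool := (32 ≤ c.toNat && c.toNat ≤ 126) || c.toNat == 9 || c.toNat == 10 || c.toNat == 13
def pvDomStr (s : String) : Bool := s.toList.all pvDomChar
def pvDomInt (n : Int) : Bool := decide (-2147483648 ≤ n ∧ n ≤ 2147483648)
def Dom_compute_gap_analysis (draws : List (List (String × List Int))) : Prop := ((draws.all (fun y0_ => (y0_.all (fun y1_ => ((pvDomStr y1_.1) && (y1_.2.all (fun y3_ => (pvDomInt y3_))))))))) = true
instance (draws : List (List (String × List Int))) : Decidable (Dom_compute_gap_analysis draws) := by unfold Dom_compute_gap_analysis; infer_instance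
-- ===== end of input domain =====

-- B drops A's last_seen dictionary: for each number 1..49 it does an independent backward
-- scan of the draws with an early break at the most recent draw containing it (per-number
-- search instead of a hash index); alternative decomposition, not faster.

-- d['numbers'] : first-match lookup; [] only outside Pre_ (where Python raises KeyError)
def pvNums (d : List (String × List Int)) : List Int :=
  (d.lookup "numbers").getD []

-- ===== PORT A =====
def compute_gap_analysis (draws : List (List (String × List Int))) : List (String × Int) :=
  let total : Int := draws.length
  let last_seen : PySem.Dict Int Int :=
    (PySem.List.enumerate draws).foldl
      (fun ls p => (pvNums p.2).foldl (fun ls n => ls.insert n p.1) ls)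
      PySem.Dict.empty
  (PySem.List.pyRange 1 50 1).map
    (fun n => (PySem.Int.toStr n, total - 1 - last_seen.getD n 0))

-- ===== PORT B =====
-- the inner 'for ri, d in enumerate(reversed(draws)): if n in d["numbers"]: gap = ri; break'
-- loop, with the initial gap = total - 1 returned when the scan falls off the end
def pvGapLoop (n total : Int) : List (List (String × List Int)) → Int → Int
  | [], _ => total - 1
  | d :: rest, ri => if n ∈ pvNums d then ri else pvGapLoop n total rest (ri + 1)

def compute_gap_analysis_alt (draws : List (List (String × List Int))) : List (String × Int) :=
  let total : Int := draws.length
  (PySem.List.pyRange 1 50 1).map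
    (fun n => (PySem.Int.toStr n, pvGapLoop n total draws.reverse 0))

-- ===== PRECONDITION & SPEC =====
-- Pre_ excludes exactly the inputs containing a draw without the key "numbers", on which
-- the Python A (and B) raises KeyError.
def Pre_compute_gap_analysis (draws : List (List (String × List Int))) : Prop :=
  ∀ d ∈ draws, "numbers" ∈ d.map Prod.fst
instance (draws : List (List (String × List Int))) : Decidable (Pre_compute_gap_analysis draws) := by
  unfold Pre_compute_gap_analysis; infer_instance

def pvWitness_compute_gap_analysis : (List (List (String × List Int))) :=
  [[("numbers", [1, 2, 3])], [("numbers", [2, 49])]]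

def Spec_compute_gap_analysis (draws : List (List (String × List Int))) (out : List (String × Int)) : Prop := out = compute_gap_analysis_alt draws
instance (draws : List (List (String × List Int))) (out : List (String × Int)) : Decidable (Spec_compute_gap_analysis draws out) := by unfold Spec_compute_gap_analysis; infer_instance

-- ===== CLAIM (what is proved, stated in full; the proofs are below) =====
def Claim_equal_compute_gap_analysis : Prop := ∀ (draws : List (List (String × List Int))), Dom_compute_gap_analysis draws → Pre_compute_gap_analysis draws → Spec_compute_gap_analysis draws (compute_gap_analysis draws)

-- ===== LEMMAS AND PROOFS =====

-- index of the LAST draw whose numbers contain m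
def lastPos? (m : Int) : List (List (String × List Int)) → Option Nat
  | [] => none
  | d :: ds =>
    match lastPos? m ds with
    | some j => some (j + 1)
    | none => if m ∈ pvNums d then some 0 else none

-- index of the FIRST draw whose numbers contain m
def firstPos? (m : Int) : List (List (String × List Int)) → Option Nat
  | [] => none
  | d :: ds => if m ∈ pvNums d then some 0 else (firstPos? m ds).map (· + 1)

theorem lastPos?_lt (m : Int) (ds : List (List (String × List Int))) (j : Nat)
    (h : lastPos? m ds = some j) : j < ds.length := by
  induction ds generalizing j with
  | nil => simp [lastPos?] at h
  | cons d t ih =>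
    simp only [lastPos?] at h
    cases ht : lastPos? m t with
    | some j' =>
      rw [ht] at h
      simp at h
      have := ih j' ht
      simp only [List.length_cons]; omega
    | none =>
      rw [ht] at h
      simp at h
      obtain ⟨-, rfl⟩ := h
      simp only [List.length_cons]; omega

theorem innerA (nums : List Int) (i : Int) :
    ∀ (ls : PySem.Dict Int Int) (m : Int),
      (nums.foldl (fun ls n => ls.insert n i) ls).get? m
        = if m ∈ nums then some i else ls.get? m := by
  induction nums with
  | nil => simp
  | cons a t ih =>
    intro ls m
    simp only [List.foldl_cons, ih, List.mem_cons]
    by_cases hm : m ∈ t <;> by_cases ha : m = a <;>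
      simp [hm, ha, PySem.Dict.get?_insert]

theorem outerA (ds : List (List (String × List Int))) :
    ∀ (k : Int) (ls : PySem.Dict Int Int) (m : Int),
      ((PySem.List.enumerate ds k).foldl
          (fun ls p => (pvNums p.2).foldl (fun ls n => ls.insert n p.1) ls) ls).get? m
        = match lastPos? m ds with
          | some j => some (k + (j : Int))
          | none => ls.get? m := by
  induction ds with
  | nil => intro k ls m; simp [PySem.List.enumerate_nil, lastPos?]
  | cons d t ih =>
    intro k ls m
    rw [PySem.List.enumerate_cons]
    simp only [List.foldl_cons]
    rw [ih]
    cases h : lastPos? m t with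
    | some j =>
      simp only [lastPos?, h]
      congr 1
      push_cast
      omega
    | none =>
      simp only [lastPos?, h, innerA]
      by_cases hm : m ∈ pvNums d <;> simp [hm]

theorem pvGapLoop_eq (n total : Int) :
    ∀ (ds : List (List (String × List Int))) (k : Int),
      pvGapLoop n total ds k
        = match firstPos? n ds with
          | some j => k + (j : Int)
          | none => total - 1 := by
  intro ds
  induction ds with
  | nil => intro k; simp [pvGapLoop, firstPos?]
  | cons d t ih =>
    intro k
    simp only [pvGapLoop, firstPos?]
    by_cases hd : n ∈ pvNums d
    · simp [hd]
    · simp only [hd, if_false, ih]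
      cases h : firstPos? n t with
      | none => simp
      | some j =>
        simp only [Option.map_some]
        push_cast
        ring

theorem firstPos?_append_singleton (m : Int) (d : List (String × List Int)) :
    ∀ xs : List (List (String × List Int)),
      firstPos? m (xs ++ [d])
        = match firstPos? m xs with
          | some j => some j
          | none => if m ∈ pvNums d then some xs.length else none := by
  intro xs
  induction xs with
  | nil => simp [firstPos?]
  | cons x t ih =>
    simp only [List.cons_append, firstPos?, ih]
    by_cases hx : m ∈ pvNums x
    · simp [hx]
    · simp only [hx, if_false]
      cases hf : firstPos? m t with
      | some j => simp
      | none =>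
        by_cases hd : m ∈ pvNums d <;> simp [hd]

theorem firstPos?_reverse (m : Int) :
    ∀ ds : List (List (String × List Int)),
      firstPos? m ds.reverse = (lastPos? m ds).map (fun j => ds.length - 1 - j) := by
  intro ds
  induction ds with
  | nil => simp [firstPos?, lastPos?]
  | cons d t ih =>
    rw [List.reverse_cons, firstPos?_append_singleton, ih]
    cases h : lastPos? m t with
    | some j =>
      simp only [lastPos?, h, Option.map_some, List.length_cons, Option.some.injEq]
      omega
    | none =>
      simp only [lastPos?, h, Option.map_none, List.length_reverse, List.length_cons]
      by_cases hd : m ∈ pvNums d <;> simp [hd]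

-- ===== VERDICT (by name: the statement is the Claim_ definition above) =====
theorem compute_gap_analysis_spec : Claim_equal_compute_gap_analysis := by
  intro draws _ _
  unfold Spec_compute_gap_analysis compute_gap_analysis compute_gap_analysis_alt
  refine List.map_congr_left ?_
  intro n _
  refine congrArg (fun v => (PySem.Int.toStr n, v)) ?_
  rw [PySem.Dict.getD_eq_get?_getD, outerA, pvGapLoop_eq, firstPos?_reverse]
  cases h : lastPos? n draws with
  | none => simp [PySem.Dict.get?_empty]
  | some j =>
    have hj := lastPos?_lt n draws j h
    simp only [Option.map_some, Option.getD_some]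
    have hc : ((draws.length - 1 - j : ℕ) : ℤ) = (draws.length : ℤ) - 1 - (j : ℤ) := by omega
    rw [hc]; ring
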